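-- pv_equiv track=rewrite | github.com/MrBrantCode/unitest_baseline | mut_generate/mist_train_taco/taco_62/solution.py | count_subarrays_with_min_k
-- ===== SOURCE A (Python) =====
-- def count_subarrays_with_min_k(array, queries):
--     n = len(array)
--     cnt = {}
--
--     for i in range(n):
--         mn = array[i]
--         for j in range(i, n):
--             mn = min(mn, array[j])
--             if mn in cnt:
--                 cnt[mn] += 1
--             else:
--                 cnt[mn] = 1
--
--     results = []
--     for k in queries:
--         if k in cnt:
--             results.append(cnt[k])
--         else:
--             results.append(0)
--
--     return results
-- ===== SOURCE B (Python) =====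
-- def count_subarrays_with_min_k(array, queries):
--     # Monotonic stack of (value, count): after processing a prefix ending at j,
--     # the stack holds the run-length encoding of [min(array[i..j]) for i <= j]
--     # (values strictly increasing from bottom to top).
--     cnt = {}
--     stack = []
--     for x in array:
--         acc = 1
--         while stack and stack[-1][0] >= x:
--             acc += stack.pop()[1]
--         stack.append((x, acc))
--         for v, c in stack:
--             cnt[v] = cnt.get(v, 0) + c
--     return [cnt.get(k, 0) for k in queries]
-- ===== Notes on version B (the rewrite author's own statement) =====
-- stated objective: faster
-- what changed: A counts running minima with a nested loop over all (left, right) pairs; B makes a single left-to-right pass keeping a monotonic (value, count) stack that run-length-encodes the minima of all subarrays ending at the current index, merging equal-minimum runs when popping.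
import Mathlib
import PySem

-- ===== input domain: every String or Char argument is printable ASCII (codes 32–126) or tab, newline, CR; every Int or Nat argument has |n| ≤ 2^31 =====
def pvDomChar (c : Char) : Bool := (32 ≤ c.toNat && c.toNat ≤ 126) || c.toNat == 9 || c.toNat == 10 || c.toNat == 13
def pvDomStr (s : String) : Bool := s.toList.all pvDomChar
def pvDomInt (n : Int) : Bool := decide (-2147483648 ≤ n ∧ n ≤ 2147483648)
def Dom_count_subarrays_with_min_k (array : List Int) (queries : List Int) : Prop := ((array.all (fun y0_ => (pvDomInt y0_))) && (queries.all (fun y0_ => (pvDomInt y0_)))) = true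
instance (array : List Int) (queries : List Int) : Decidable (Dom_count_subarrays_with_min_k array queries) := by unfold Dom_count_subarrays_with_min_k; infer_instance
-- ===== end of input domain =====

-- B replaces A's quadratic "running minimum per left endpoint" double loop by a single
-- left-to-right pass with a monotonic stack holding the run-length encoding of the
-- running minima of the subarrays ending at the current index (objective: alternative).

-- ===== PORT A =====
def pvBumpA (cnt : PySem.Dict Int Int) (mn : Int) : PySem.Dict Int Int :=
  if cnt.contains mn then cnt.insert mn (cnt.getD mn 0 + 1) else cnt.insert mn 1

def pvInnerA (array : List Int) (cnt : PySem.Dict Int Int) (i : Int) : PySem.Dict Int Int :=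
  ((PySem.List.pyRange i (array.length : Int) 1).foldl
    (fun (s : PySem.Dict Int Int × Int) j =>
      let mn := min s.2 (PySem.List.pyGetD array j 0)
      (pvBumpA s.1 mn, mn))
    (cnt, PySem.List.pyGetD array i 0)).1

def pvCntA (array : List Int) : PySem.Dict Int Int :=
  (PySem.List.pyRange 0 (array.length : Int) 1).foldl (pvInnerA array) PySem.Dict.empty

def count_subarrays_with_min_k (array : List Int) (queries : List Int) : List Int :=
  let cnt := pvCntA array
  queries.foldl
    (fun results k => if cnt.contains k then results ++ [cnt.getD k 0] else results ++ [0]) []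

-- ===== PORT B =====
def pvPop (x : Int) : List (Int × Int) → Int → Int × List (Int × Int)
  | [], acc => (acc, [])
  | (v, c) :: rest, acc => if x ≤ v then pvPop x rest (acc + c) else (acc, (v, c) :: rest)

def pvStepB (s : PySem.Dict Int Int × List (Int × Int)) (x : Int) :
    PySem.Dict Int Int × List (Int × Int) :=
  let pr := pvPop x s.2 1
  let stk := (x, pr.1) :: pr.2
  (stk.reverse.foldl (fun cnt vc => cnt.insert vc.1 (cnt.getD vc.1 0 + vc.2)) s.1, stk)

def count_subarrays_with_min_k_alt (array : List Int) (queries : List Int) : List Int :=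
  let s := array.foldl pvStepB (PySem.Dict.empty, [])
  queries.map (fun k => s.1.getD k 0)

-- ===== PRECONDITION & SPEC =====
def Spec_count_subarrays_with_min_k (array : List Int) (queries : List Int) (out : List Int) : Prop := out = count_subarrays_with_min_k_alt array queries
instance (array : List Int) (queries : List Int) (out : List Int) : Decidable (Spec_count_subarrays_with_min_k array queries out) := by unfold Spec_count_subarrays_with_min_k; infer_instance

-- ===== CLAIM (what is proved, stated in full; the proofs are below) =====
def Claim_equal_count_subarrays_with_min_k : Prop := ∀ (array : List Int) (queries : List Int), Dom_count_subarrays_with_min_k array queries → Spec_count_subarrays_with_min_k array queries (count_subarrays_with_min_k array queries)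

-- ===== LEMMAS AND PROOFS =====
def scanMin : Int → List Int → List Int
  | _, [] => []
  | m, y :: ys => (min m y) :: scanMin (min m y) ys

def tailMins (p : List Int) : List Int := p.foldl (fun r x => x :: r.map (min x)) []

def decodeStk (s : List (Int × Int)) : List Int :=
  s.flatMap (fun vc => List.replicate vc.2.toNat vc.1)

def minOf (l : List Int) : Int := l.foldl min (l.headD 0)

def pvV (array : List Int) (i t : Nat) : Int :=
  ((array.drop i).take (t + 1)).foldl min (array.getD i 0)

def InvB (stk : List (Int × Int)) (p : List Int) : Prop :=
  decodeStk stk = tailMins p ∧ (stk.map (·.1)).Pairwise (fun a b => b < a) ∧ ∀ vc ∈ stk, 0 < vc.2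

def pvTB (k : Int) : List Int → List Int → Nat
  | _, [] => 0
  | p, x :: r => (tailMins (p ++ [x])).count k + pvTB k (p ++ [x]) r

-- ===== A-side lemmas =====
lemma bumpA_getD (d : PySem.Dict Int Int) (v k : Int) :
    (pvBumpA d v).getD k 0 = d.getD k 0 + (if k = v then 1 else 0) := by
  unfold pvBumpA
  by_cases h : d.contains v = true
  · rw [if_pos h, PySem.Dict.getD_insert]
    by_cases hk : k = v
    · rw [if_pos hk, if_pos hk, hk]
    · rw [if_neg hk, if_neg hk]; omega
  · rw [if_neg h, PySem.Dict.getD_insert]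
    by_cases hk : k = v
    · rw [if_pos hk, if_pos hk, hk]
      have h0 : d.getD v 0 = 0 := by
        simp [PySem.Dict.getD_of_not_contains, show d.contains v = false by simpa using h]
      omega
    · rw [if_neg hk, if_neg hk]; omega

lemma foldA (k : Int) : ∀ (l : List Int) (d : PySem.Dict Int Int) (m : Int),
    ((l.foldl (fun (s : PySem.Dict Int Int × Int) y =>
        (pvBumpA s.1 (min s.2 y), min s.2 y)) (d, m)).1).getD k 0
      = d.getD k 0 + ((scanMin m l).count k : Int) := by
  intro l
  induction l with
  | nil => intro d m; simp [scanMin]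
  | cons y ys ih =>
      intro d m
      simp only [List.foldl_cons]
      rw [ih, bumpA_getD, scanMin]
      rw [List.count_cons]
      by_cases h : k = min m y
      · rw [if_pos h, if_pos (by simpa using h.symm)]
        push_cast
        omega
      · rw [if_neg h, if_neg (by simpa using fun hh : min m y = k => h hh.symm)]
        push_cast
        omega

lemma innerA_drop (array : List Int) (cnt : PySem.Dict Int Int) (i : Nat) :
    pvInnerA array cnt (i : Int)
      = ((array.drop i).foldl (fun (s : PySem.Dict Int Int × Int) y =>
          (pvBumpA s.1 (min s.2 y), min s.2 y)) (cnt, array.getD i 0)).1 := by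
  unfold pvInnerA
  rw [PySem.List.foldl_pyRange_pyGetD' array 0
    (f := fun (s : PySem.Dict Int Int × Int) y => (pvBumpA s.1 (min s.2 y), min s.2 y))
    (init := (cnt, PySem.List.pyGetD array (i : Int) 0)) (a := (i : Int))
    (ha := Int.natCast_nonneg i)]
  simp

lemma cnt_fold_sum (k : Int) : ∀ (l : List Nat) (F : PySem.Dict Int Int → Nat → PySem.Dict Int Int)
    (w : Nat → Int) (_h : ∀ d x, x ∈ l → (F d x).getD k 0 = d.getD k 0 + w x)
    (d : PySem.Dict Int Int),
    (l.foldl F d).getD k 0 = d.getD k 0 + (l.map w).sum := by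
  intro l
  induction l with
  | nil => intro F w _ d; simp
  | cons x xs ih =>
      intro F w h d
      simp only [List.foldl_cons, List.map_cons, List.sum_cons]
      rw [ih F w (fun d x hx => h d x (List.mem_cons_of_mem _ hx)), h d x List.mem_cons_self]
      omega

lemma cntA_getD (array : List Int) (k : Int) :
    (pvCntA array).getD k 0
      = ((List.range array.length).map
          (fun i => ((scanMin (array.getD i 0) (array.drop i)).count k : Int))).sum := by
  unfold pvCntA
  rw [PySem.List.pyRange_one]
  simp only [Int.sub_zero, Int.toNat_natCast, List.foldl_map, zero_add]
  rw [cnt_fold_sum k (List.range array.length)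
      (fun d i => pvInnerA array d (i : Int))
      (fun i => ((scanMin (array.getD i 0) (array.drop i)).count k : Int))
      (fun d i _ => by
        show (pvInnerA array d (i : Int)).getD k 0
          = d.getD k 0 + ((scanMin (array.getD i 0) (array.drop i)).count k : Int)
        rw [innerA_drop, foldA])
      PySem.Dict.empty]
  simp [PySem.Dict.getD_empty]

-- ===== B-side lemmas =====
lemma pvPop_eq (x : Int) : ∀ (stk : List (Int × Int)) (acc : Int),
    pvPop x stk acc
      = (acc + ((stk.takeWhile (fun vc => decide (x ≤ vc.1))).map (·.2)).sum,
         stk.dropWhile (fun vc => decide (x ≤ vc.1))) := by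
  intro stk
  induction stk with
  | nil => intro acc; simp [pvPop]
  | cons vc rest ih =>
      intro acc
      obtain ⟨v, c⟩ := vc
      rw [show pvPop x ((v, c) :: rest) acc
            = if x ≤ v then pvPop x rest (acc + c) else (acc, (v, c) :: rest) from rfl]
      by_cases h : x ≤ v
      · rw [if_pos h, ih, List.takeWhile_cons_of_pos (by simpa using h),
          List.dropWhile_cons_of_pos (by simpa using h)]
        simp only [List.map_cons, List.sum_cons, Prod.mk.injEq]
        exact ⟨by omega, trivial⟩
      · rw [if_neg h, List.takeWhile_cons_of_neg (by simpa using h),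
          List.dropWhile_cons_of_neg (by simpa using h)]
        simp

lemma tailMins_append (p : List Int) (x : Int) :
    tailMins (p ++ [x]) = x :: (tailMins p).map (min x) := by
  simp [tailMins, List.foldl_append]

lemma decodeStk_append (a b : List (Int × Int)) :
    decodeStk (a ++ b) = decodeStk a ++ decodeStk b := by
  simp [decodeStk]

lemma decode_all_ge (x : Int) : ∀ (pre : List (Int × Int)), (∀ vc ∈ pre, x ≤ vc.1) →
    (decodeStk pre).map (min x) = List.replicate ((pre.map (fun vc => vc.2.toNat)).sum) x := by
  intro pre
  induction pre with
  | nil => intro _; simp [decodeStk]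
  | cons vc rest ih =>
      intro h
      obtain ⟨v, c⟩ := vc
      have hv : x ≤ v := h (v, c) List.mem_cons_self
      simp only [decodeStk, List.flatMap_cons, List.map_append, List.map_replicate,
        List.map_cons, List.sum_cons]
      rw [min_eq_left hv]
      rw [show (List.flatMap (fun vc => List.replicate vc.2.toNat vc.1) rest).map (min x)
            = List.replicate ((rest.map (fun vc => vc.2.toNat)).sum) x from ih
            (fun vc hvc => h vc (List.mem_cons_of_mem _ hvc))]
      rw [← List.replicate_append_replicate]

lemma decode_all_lt (x : Int) : ∀ (rest : List (Int × Int)), (∀ vc ∈ rest, vc.1 < x) →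
    (decodeStk rest).map (min x) = decodeStk rest := by
  intro rest
  induction rest with
  | nil => intro _; simp [decodeStk]
  | cons vc r ih =>
      intro h
      obtain ⟨v, c⟩ := vc
      have hv : v < x := h (v, c) List.mem_cons_self
      simp only [decodeStk, List.flatMap_cons, List.map_append, List.map_replicate]
      rw [min_eq_right hv.le]
      rw [show (List.flatMap (fun vc => List.replicate vc.2.toNat vc.1) r).map (min x)
            = List.flatMap (fun vc => List.replicate vc.2.toNat vc.1) r from ih
            (fun vc hvc => h vc (List.mem_cons_of_mem _ hvc))]

lemma sum_toNat_of_pos : ∀ (pre : List (Int × Int)), (∀ vc ∈ pre, 0 < vc.2) →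
    (pre.map (·.2)).sum = Nat.cast ((pre.map (fun vc => vc.2.toNat)).sum) := by
  intro pre
  induction pre with
  | nil => intro _; simp
  | cons vc r ih =>
      intro h
      obtain ⟨v, c⟩ := vc
      have hc : 0 < c := h (v, c) List.mem_cons_self
      simp only [List.map_cons, List.sum_cons]
      rw [ih (fun vc hvc => h vc (List.mem_cons_of_mem _ hvc))]
      omega

lemma dropWhile_all_lt (x : Int) (stk : List (Int × Int))
    (hp : (stk.map (·.1)).Pairwise (fun a b => b < a)) :
    ∀ vc ∈ stk.dropWhile (fun vc => decide (x ≤ vc.1)), vc.1 < x := by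
  induction stk with
  | nil => simp
  | cons vc rest ih =>
      obtain ⟨v, c⟩ := vc
      simp only [List.map_cons, List.pairwise_cons] at hp
      by_cases h : x ≤ v
      · rw [List.dropWhile_cons_of_pos (by simpa using h)]
        exact ih hp.2
      · rw [List.dropWhile_cons_of_neg (by simpa using h)]
        intro vc hvc
        rcases List.mem_cons.mp hvc with h1 | h1
        · subst h1; omega
        · have := hp.1 vc.1 (List.mem_map_of_mem h1)
          omega

lemma stepB_inv (stk : List (Int × Int)) (p : List Int) (x : Int) (h : InvB stk p) :
    InvB ((x, (pvPop x stk 1).1) :: (pvPop x stk 1).2) (p ++ [x]) := by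
  obtain ⟨hdec, hpair, hpos⟩ := h
  rw [pvPop_eq]
  dsimp only
  set P : Int × Int → Bool := fun vc => decide (x ≤ vc.1) with hP
  have hsplit : stk = stk.takeWhile P ++ stk.dropWhile P := (List.takeWhile_append_dropWhile).symm
  have hpre : ∀ vc ∈ stk.takeWhile P, x ≤ vc.1 := by
    intro vc hvc
    have := List.mem_takeWhile_imp hvc
    simpa [hP] using this
  have hrest : ∀ vc ∈ stk.dropWhile P, vc.1 < x := dropWhile_all_lt x stk hpair
  have hposd : ∀ vc ∈ stk.dropWhile P, 0 < vc.2 := by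
    intro vc hvc; exact hpos vc ((List.dropWhile_sublist P).mem hvc)
  have hpost : ∀ vc ∈ stk.takeWhile P, 0 < vc.2 := by
    intro vc hvc; exact hpos vc ((List.takeWhile_sublist P).mem hvc)
  have hs : ((stk.takeWhile P).map (·.2)).sum
      = Nat.cast (((stk.takeWhile P).map (fun vc => vc.2.toNat)).sum) := sum_toNat_of_pos _ hpost
  refine ⟨?_, ?_, ?_⟩
  · -- decode equality
    rw [tailMins_append, ← hdec]
    conv_rhs => rw [hsplit]
    rw [decodeStk_append, List.map_append, decode_all_ge x _ hpre, decode_all_lt x _ hrest]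
    show decodeStk ((x, 1 + ((stk.takeWhile P).map (·.2)).sum) :: stk.dropWhile P) = _
    simp only [decodeStk, List.flatMap_cons]
    rw [show (1 + ((stk.takeWhile P).map (·.2)).sum).toNat
          = ((stk.takeWhile P).map (fun vc => vc.2.toNat)).sum + 1 by omega]
    rw [List.replicate_succ]
    simp
  · -- pairwise
    simp only [List.map_cons, List.pairwise_cons]
    constructor
    · intro a ha
      obtain ⟨vc, hvc, rfl⟩ := List.mem_map.mp ha
      exact hrest vc hvc
    · exact hpair.sublist ((List.dropWhile_sublist P).map _)
  · -- positivity
    intro vc hvc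
    rcases List.mem_cons.mp hvc with h1 | h1
    · subst h1
      dsimp only
      omega
    · exact hposd vc h1

lemma foldB_cnt (k : Int) : ∀ (e : List (Int × Int)) (d : PySem.Dict Int Int),
    (e.foldl (fun cnt vc => cnt.insert vc.1 (cnt.getD vc.1 0 + vc.2)) d).getD k 0
      = d.getD k 0 + (e.map (fun vc => if vc.1 = k then vc.2 else 0)).sum := by
  intro e
  induction e with
  | nil => intro d; simp
  | cons vc rest ih =>
      intro d
      simp only [List.foldl_cons, List.map_cons, List.sum_cons]
      rw [ih, PySem.Dict.getD_insert]
      by_cases h : k = vc.1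
      · rw [if_pos h, if_pos h.symm, h]
        omega
      · rw [if_neg h, if_neg (fun hh => h hh.symm)]
        omega

lemma wsum_reverse (k : Int) (e : List (Int × Int)) :
    (e.reverse.map (fun vc => if vc.1 = k then vc.2 else 0)).sum
      = (e.map (fun vc => if vc.1 = k then vc.2 else 0)).sum := by
  rw [List.map_reverse, List.sum_reverse]

lemma wsum_eq_decode_count (k : Int) : ∀ (e : List (Int × Int)), (∀ vc ∈ e, 0 < vc.2) →
    (e.map (fun vc => if vc.1 = k then vc.2 else 0)).sum = ((decodeStk e).count k : Int) := by
  intro e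
  induction e with
  | nil => intro _; simp [decodeStk]
  | cons vc rest ih =>
      intro h
      obtain ⟨v, c⟩ := vc
      have hc : 0 < c := h (v, c) List.mem_cons_self
      have hr := ih (fun vc hvc => h vc (List.mem_cons_of_mem _ hvc))
      simp only [List.map_cons, List.sum_cons, decodeStk, List.flatMap_cons, List.count_append]
      rw [show (List.flatMap (fun vc => List.replicate vc.2.toNat vc.1) rest).count k
            = ((decodeStk rest).count k) from rfl]
      rw [List.count_replicate, hr]
      by_cases hv : v = k
      · rw [if_pos hv, if_pos (by simpa using hv)]
        push_cast
        omega
      · rw [if_neg hv, if_neg (by simpa using hv)]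
        push_cast
        omega

lemma foldB_main (k : Int) : ∀ (rest : List Int) (d : PySem.Dict Int Int)
    (stk : List (Int × Int)) (p : List Int), InvB stk p →
    ((rest.foldl pvStepB (d, stk)).1).getD k 0 = d.getD k 0 + (pvTB k p rest : Int) := by
  intro rest
  induction rest with
  | nil => intro d stk p _; simp [pvTB]
  | cons x r ih =>
      intro d stk p hinv
      have hinv' := stepB_inv stk p x hinv
      simp only [List.foldl_cons]
      rw [show pvStepB (d, stk) x
            = ((((x, (pvPop x stk 1).1) :: (pvPop x stk 1).2).reverse.foldl
                (fun cnt vc => cnt.insert vc.1 (cnt.getD vc.1 0 + vc.2)) d),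
               ((x, (pvPop x stk 1).1) :: (pvPop x stk 1).2)) from rfl]
      rw [ih _ _ _ hinv']
      rw [foldB_cnt]
      rw [wsum_reverse, wsum_eq_decode_count k _ hinv'.2.2, hinv'.1]
      show d.getD k 0 + ((tailMins (p ++ [x])).count k : Int) + (pvTB k (p ++ [x]) r : Int)
        = d.getD k 0 + (pvTB k p (x :: r) : Int)
      rw [show pvTB k p (x :: r) = (tailMins (p ++ [x])).count k + pvTB k (p ++ [x]) r from rfl]
      push_cast
      omega

lemma cntB_getD (array : List Int) (k : Int) :
    ((array.foldl pvStepB (PySem.Dict.empty, [])).1).getD k 0 = (pvTB k [] array : Int) := by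
  rw [foldB_main k array PySem.Dict.empty [] [] ⟨by simp [decodeStk, tailMins], by simp, by simp⟩]
  simp [PySem.Dict.getD_empty]

lemma pvTB_eq (k : Int) : ∀ (rest p : List Int),
    pvTB k p rest
      = ((List.range rest.length).map
          (fun t => (tailMins (p ++ rest.take (t + 1))).count k)).sum := by
  intro rest
  induction rest with
  | nil => intro p; simp [pvTB]
  | cons x r ih =>
      intro p
      rw [show pvTB k p (x :: r) = (tailMins (p ++ [x])).count k + pvTB k (p ++ [x]) r from rfl]
      rw [ih (p ++ [x])]
      rw [List.length_cons, List.range_succ_eq_map, List.map_cons, List.map_map, List.sum_cons]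
      congr 1
      apply congrArg List.sum
      apply List.map_congr_left
      intro t _
      simp [Function.comp]

-- ===== characterizations =====
lemma scanMin_eq : ∀ (l : List Int) (m : Int),
    scanMin m l = (List.range l.length).map (fun t => (l.take (t + 1)).foldl min m) := by
  intro l
  induction l with
  | nil => intro m; simp [scanMin]
  | cons y ys ih =>
      intro m
      rw [scanMin, ih (min m y)]
      simp only [List.length_cons, List.range_succ_eq_map, List.map_cons, List.map_map,
        List.cons.injEq]
      refine ⟨by simp, ?_⟩
      apply List.map_congr_left
      intro t ht
      simp [Function.comp, List.take_succ_cons, List.foldl_cons]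

lemma minOf_append_singleton (s : List Int) (x : Int) (hs : s ≠ []) :
    minOf (s ++ [x]) = min x (minOf s) := by
  unfold minOf
  rw [List.foldl_append]
  simp only [List.foldl_cons, List.foldl_nil]
  rw [show (s ++ [x]).headD 0 = s.headD 0 by
    cases s with
    | nil => exact absurd rfl hs
    | cons a t => simp]
  rw [min_comm]

lemma tailMins_eq : ∀ (p : List Int),
    tailMins p = (List.range p.length).map (fun t => minOf (p.drop (p.length - (t + 1)))) := by
  intro p
  induction p using List.reverseRecOn with
  | nil => simp [tailMins]
  | append_singleton p x ih =>
      rw [tailMins_append, ih]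
      simp only [List.length_append, List.length_singleton, List.range_succ_eq_map,
        List.map_cons, List.map_map]
      congr 1
      · simp [minOf]
      · apply List.map_congr_left
        intro t ht
        simp only [Function.comp_apply]
        have ht' : t < p.length := List.mem_range.mp ht
        have harith : p.length + 1 - (t + 1 + 1) = p.length - (t + 1) := by omega
        rw [harith]
        have hle : p.length - (t + 1) ≤ p.length := by omega
        rw [List.drop_append_of_le_length hle]
        have hne : p.drop (p.length - (t + 1)) ≠ [] := by
          intro hcon
          have := List.drop_eq_nil_iff.mp hcon
          omega
        rw [minOf_append_singleton _ x hne]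

lemma headD_slice (array : List Int) (i t : Nat) (h : i < array.length) :
    ((array.drop i).take (t + 1)).headD 0 = array.getD i 0 := by
  have hne : array.drop i ≠ [] := by
    intro hcon; have := List.drop_eq_nil_iff.mp hcon; omega
  cases hd : array.drop i with
  | nil => exact absurd hd hne
  | cons a s =>
      simp only [List.take_succ_cons, List.headD_cons]
      have : array.getD i 0 = (array.drop i).headD 0 := by
        rw [List.getD_eq_getElem?_getD, List.headD_eq_head?_getD, List.head?_drop]
      rw [this, hd, List.headD_cons]

lemma minOf_slice (array : List Int) (i t : Nat) (h : i < array.length) :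
    minOf ((array.drop i).take (t + 1)) = pvV array i t := by
  unfold minOf pvV
  rw [headD_slice array i t h]

lemma scanMin_drop (array : List Int) (i : Nat) :
    scanMin (array.getD i 0) (array.drop i)
      = (List.range (array.length - i)).map (fun t => pvV array i t) := by
  rw [scanMin_eq, List.length_drop]
  rfl

lemma tailMins_take (array : List Int) (j : Nat) (hj : j < array.length) :
    tailMins (array.take (j + 1))
      = (List.range (j + 1)).map (fun t => pvV array (j - t) t) := by
  rw [tailMins_eq]
  have hlen : (array.take (j + 1)).length = j + 1 := by
    rw [List.length_take]; omega
  rw [hlen]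
  apply List.map_congr_left
  intro t ht
  have ht' : t < j + 1 := List.mem_range.mp ht
  have h1 : j + 1 - (t + 1) = j - t := by omega
  rw [h1]
  rw [List.drop_take]
  have h2 : j + 1 - (j - t) = t + 1 := by omega
  rw [h2]
  exact minOf_slice array (j - t) t (by omega)

-- ===== counting and exchange =====
lemma count_map_range (f : Nat → Int) (k : Int) (m : Nat) :
    ((List.range m).map f).count k = ∑ t ∈ Finset.range m, (if f t = k then 1 else 0) := by
  induction m with
  | zero => simp
  | succ m ih =>
      rw [List.range_succ, List.map_append, List.count_append, Finset.sum_range_succ, ih]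
      simp [List.count_singleton, beq_iff_eq]

lemma map_range_sum_int (g : Nat → Int) (m : Nat) :
    ((List.range m).map g).sum = ∑ i ∈ Finset.range m, g i := by
  induction m with
  | zero => simp
  | succ m ih =>
      rw [List.range_succ, List.map_append, List.sum_append, Finset.sum_range_succ, ih]
      simp

lemma exchange (array : List Int) (k : Int) :
    (∑ i ∈ Finset.range array.length, ∑ t ∈ Finset.range (array.length - i),
        (if pvV array i t = k then (1 : Int) else 0))
      = ∑ j ∈ Finset.range array.length, ∑ t ∈ Finset.range (j + 1),
        (if pvV array (j - t) t = k then (1 : Int) else 0) := by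
  rw [Finset.sum_sigma', Finset.sum_sigma']
  refine Finset.sum_nbij' (fun a => ⟨a.1 + a.2, a.2⟩) (fun a => ⟨a.1 - a.2, a.2⟩) ?_ ?_ ?_ ?_ ?_
  · intro a ha
    simp only [Finset.mem_sigma, Finset.mem_range] at ha ⊢
    omega
  · intro a ha
    simp only [Finset.mem_sigma, Finset.mem_range] at ha ⊢
    omega
  · intro a ha
    simp only [Finset.mem_sigma, Finset.mem_range] at ha
    simp
  · intro a ha
    simp only [Finset.mem_sigma, Finset.mem_range] at ha
    refine Sigma.ext (by simp; omega) ?_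
    simp
  · intro a ha
    simp only [Finset.mem_sigma, Finset.mem_range] at ha
    simp

-- ===== grand totals =====
lemma pv_cast_map_sum (m : Nat) (f : Nat → Nat) :
    (Nat.cast (((List.range m).map f).sum) : Int)
      = ((List.range m).map (fun t => (f t : Int))).sum := by
  induction m with
  | zero => simp
  | succ m ih =>
      rw [List.range_succ, List.map_append, List.map_append, List.sum_append, List.sum_append,
        ← ih]
      simp

lemma totals_eq (array : List Int) (k : Int) :
    (pvCntA array).getD k 0 = ((array.foldl pvStepB (PySem.Dict.empty, [])).1).getD k 0 := by
  rw [cntA_getD, cntB_getD, pvTB_eq]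
  simp only [List.nil_append]
  rw [map_range_sum_int]
  rw [pv_cast_map_sum array.length (fun t => (tailMins (array.take (t + 1))).count k)]
  rw [map_range_sum_int]
  have hA : ∀ i ∈ Finset.range array.length,
      ((scanMin (array.getD i 0) (array.drop i)).count k : Int)
        = ∑ t ∈ Finset.range (array.length - i), (if pvV array i t = k then (1 : Int) else 0) := by
    intro i _
    rw [scanMin_drop, count_map_range, Nat.cast_sum]
    apply Finset.sum_congr rfl
    intro t _
    split_ifs <;> simp
  have hB : ∀ j ∈ Finset.range array.length,
      ((tailMins (array.take (j + 1))).count k : Int)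
        = ∑ t ∈ Finset.range (j + 1), (if pvV array (j - t) t = k then (1 : Int) else 0) := by
    intro j hj
    rw [tailMins_take array j (Finset.mem_range.mp hj), count_map_range, Nat.cast_sum]
    apply Finset.sum_congr rfl
    intro t _
    split_ifs <;> simp
  rw [Finset.sum_congr rfl hA, Finset.sum_congr rfl hB]
  exact exchange array k

-- ===== final =====
lemma main_equiv : ∀ (array : List Int) (queries : List Int),
    count_subarrays_with_min_k array queries = count_subarrays_with_min_k_alt array queries := by
  intro array queries
  unfold count_subarrays_with_min_k count_subarrays_with_min_k_alt
  simp only []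
  have hcongr := PySem.List.foldl_congr_mem (l := queries)
    (f := fun (results : List Int) k =>
      if (pvCntA array).contains k then results ++ [(pvCntA array).getD k 0] else results ++ [0])
    (g := fun (results : List Int) k => results ++ [(pvCntA array).getD k 0])
    (init := ([] : List Int))
    (by
      intro acc y _
      show (if (pvCntA array).contains y then acc ++ [(pvCntA array).getD y 0] else acc ++ [0])
        = acc ++ [(pvCntA array).getD y 0]
      by_cases h : (pvCntA array).contains y = true
      · rw [if_pos h]
      · rw [if_neg h]
        simp [PySem.Dict.getD_of_not_contains,
          show (pvCntA array).contains y = false by simpa using h])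
  rw [hcongr, PySem.List.foldl_append_singleton_eq_map]
  simp only [List.nil_append]
  apply List.map_congr_left
  intro k _
  exact totals_eq array k

-- ===== VERDICT (by name: the statement is the Claim_ definition above) =====
theorem count_subarrays_with_min_k_spec : Claim_equal_count_subarrays_with_min_k := by
  intro array queries _
  exact main_equiv array queries
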